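-- pv_equiv track=rewrite | github.com/Ziolli/Case-Indicium | src/case_indicium/agent/intent_router.py | _detect_metric
-- ===== SOURCE A (Python) =====
-- from typing import Optional, Dict, Tuple, List, Literal
--
-- _METRIC_ALIASES: Dict[str, str] = {
--     # growth
--     "taxa de aumento": "growth_7d",
--     "crescimento 7d": "growth_7d",
--     "aumento 7 dias": "growth_7d",
--     "growth": "growth_7d",
--     # cfr
--     "cfr": "cfr_30d_closed",
--     "crf": "cfr_30d_closed",
--     "case fatality rate": "cfr_30d_closed",
--     "taxa de letalidade": "cfr_30d_closed",
--     "letalidade": "cfr_30d_closed",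
--     "taxa de mortalidade de casos": "cfr_30d_closed",
--     # icu
--     "uti": "icu_rate_30d",
--     "taxa de uti": "icu_rate_30d",
--     "icu rate": "icu_rate_30d",
--     "percentual de casos com uti": "icu_rate_30d",
--     "internacao em uti": "icu_rate_30d",
--     "admissao em uti": "icu_rate_30d",
--     # vaccinated
--     "taxa de vacinacao": "vaccinated_rate_30d",
--     "taxa de vacinados": "vaccinated_rate_30d",
--     "percentual de vacinados": "vaccinated_rate_30d",
--     "vaccinated rate": "vaccinated_rate_30d",
-- }
--
-- def _detect_metric(t_norm: str) -> Optional[str]: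
--     """Phrase-first; fallback token check for cfr/crf."""
--     for k, mid in sorted(_METRIC_ALIASES.items(), key=lambda x: -len(x[0])):
--         if k in t_norm:
--             return mid
--     tokens = t_norm.split()
--     if "cfr" in tokens or "crf" in tokens:
--         return "cfr_30d_closed"
--     return None
-- ===== SOURCE B (Python) =====
-- from typing import Optional, Dict
--
-- _METRIC_ALIASES: Dict[str, str] = {
--     # growth
--     "taxa de aumento": "growth_7d",
--     "crescimento 7d": "growth_7d",
--     "aumento 7 dias": "growth_7d",
--     "growth": "growth_7d",
--     # cfr
--     "cfr": "cfr_30d_closed",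
--     "crf": "cfr_30d_closed",
--     "case fatality rate": "cfr_30d_closed",
--     "taxa de letalidade": "cfr_30d_closed",
--     "letalidade": "cfr_30d_closed",
--     "taxa de mortalidade de casos": "cfr_30d_closed",
--     # icu
--     "uti": "icu_rate_30d",
--     "taxa de uti": "icu_rate_30d",
--     "icu rate": "icu_rate_30d",
--     "percentual de casos com uti": "icu_rate_30d",
--     "internacao em uti": "icu_rate_30d",
--     "admissao em uti": "icu_rate_30d",
--     # vaccinated
--     "taxa de vacinacao": "vaccinated_rate_30d",
--     "taxa de vacinados": "vaccinated_rate_30d",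
--     "percentual de vacinados": "vaccinated_rate_30d",
--     "vaccinated rate": "vaccinated_rate_30d",
-- }
--
-- def _detect_metric(t_norm: str) -> Optional[str]:
--     """Single pass in dict order keeping the longest matching alias (no per-call sort).
--
--     Strict '>' with insertion-order iteration reproduces the stable sort's tie-break."""
--     best_len = -1
--     best_mid = None
--     for k, mid in _METRIC_ALIASES.items():
--         if k in t_norm and len(k) > best_len:
--             best_len = len(k)
--             best_mid = mid
--     if best_mid is not None:
--         return best_mid
--     tokens = t_norm.split()
--     if "cfr" in tokens or "crf" in tokens:
--         return "cfr_30d_closed"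
--     return None
-- ===== Notes on version B (the rewrite author's own statement) =====
-- stated objective: alternative
-- what changed: Replaces the per-call stable sort of all aliases by descending length followed by a first-match scan with a single pass over the dict in insertion order that tracks the longest matching alias (strict '>' reproduces the stable sort's tie-break); the cfr/crf token fallback is kept unchanged.
import Mathlib
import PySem

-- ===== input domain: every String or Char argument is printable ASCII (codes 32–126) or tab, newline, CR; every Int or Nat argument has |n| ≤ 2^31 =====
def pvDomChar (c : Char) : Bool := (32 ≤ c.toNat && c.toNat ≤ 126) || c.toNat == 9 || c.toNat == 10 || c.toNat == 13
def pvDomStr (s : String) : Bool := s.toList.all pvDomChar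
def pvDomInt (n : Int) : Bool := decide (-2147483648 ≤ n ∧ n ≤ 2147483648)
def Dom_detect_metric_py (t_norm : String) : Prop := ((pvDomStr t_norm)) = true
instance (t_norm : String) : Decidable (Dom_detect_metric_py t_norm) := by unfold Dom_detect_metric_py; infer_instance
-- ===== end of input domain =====

-- B replaces A's per-call sort-by-descending-length + first-match scan by one insertion-order
-- pass tracking the longest matching alias (alternative decomposition; same observable result).

-- the module constant _METRIC_ALIASES (dict in insertion order; keys are distinct)
def pvAliases : List (String × String) := [
  ("taxa de aumento", "growth_7d"),
  ("crescimento 7d", "growth_7d"),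
  ("aumento 7 dias", "growth_7d"),
  ("growth", "growth_7d"),
  ("cfr", "cfr_30d_closed"),
  ("crf", "cfr_30d_closed"),
  ("case fatality rate", "cfr_30d_closed"),
  ("taxa de letalidade", "cfr_30d_closed"),
  ("letalidade", "cfr_30d_closed"),
  ("taxa de mortalidade de casos", "cfr_30d_closed"),
  ("uti", "icu_rate_30d"),
  ("taxa de uti", "icu_rate_30d"),
  ("icu rate", "icu_rate_30d"),
  ("percentual de casos com uti", "icu_rate_30d"),
  ("internacao em uti", "icu_rate_30d"),
  ("admissao em uti", "icu_rate_30d"),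
  ("taxa de vacinacao", "vaccinated_rate_30d"),
  ("taxa de vacinados", "vaccinated_rate_30d"),
  ("percentual de vacinados", "vaccinated_rate_30d"),
  ("vaccinated rate", "vaccinated_rate_30d")]

-- ===== PORT A =====
-- 'for k, mid in sorted(...): if k in t_norm: return mid' — first match wins
def pvLoopA : List (String × String) → String → Option String
  | [], _ => none
  | (k, mid) :: rest, t => if PySem.Str.isIn k t then some mid else pvLoopA rest t

def detect_metric_py (t_norm : String) : Option String :=
  match pvLoopA (PySem.List.sorted pvAliases (fun x => -(PySem.Str.len x.1))) t_norm with
  | some mid => some mid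
  | none =>
    let tokens := PySem.Str.split₀ t_norm
    if tokens.contains "cfr" || tokens.contains "crf" then some "cfr_30d_closed" else none

-- ===== PORT B =====
-- one pass in insertion order: (best_len, best_mid), update on 'k in t_norm and len(k) > best_len'
def detect_metric_py_alt (t_norm : String) : Option String :=
  let best := pvAliases.foldl
    (fun (acc : Int × Option String) kv =>
      if PySem.Str.isIn kv.1 t_norm && decide (acc.1 < PySem.Str.len kv.1)
      then (PySem.Str.len kv.1, some kv.2) else acc)
    (-1, none)
  match best.2 with
  | some mid => some mid
  | none =>
    let tokens := PySem.Str.split₀ t_norm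
    if tokens.contains "cfr" || tokens.contains "crf" then some "cfr_30d_closed" else none

-- ===== PRECONDITION & SPEC =====
def Spec_detect_metric_py (t_norm : String) (out : Option String) : Prop := out = detect_metric_py_alt t_norm
instance (t_norm : String) (out : Option String) : Decidable (Spec_detect_metric_py t_norm out) := by unfold Spec_detect_metric_py; infer_instance

-- ===== CLAIM (what is proved, stated in full; the proofs are below) =====
def Claim_equal_detect_metric_py : Prop := ∀ (t_norm : String), Dom_detect_metric_py t_norm → Spec_detect_metric_py t_norm (detect_metric_py t_norm)

-- ===== LEMMAS AND PROOFS =====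

-- A's scan loop is List.find? projected to the metric id
theorem pvLoopA_eq_find (t : String) (l : List (String × String)) :
    pvLoopA l t = (l.find? (fun kv => PySem.Str.isIn kv.1 t)).map Prod.snd := by
  induction l with
  | nil => rfl
  | cons kv rest ih =>
    obtain ⟨k, mid⟩ := kv
    by_cases h : PySem.Chars.isIn k.toList t.toList = true
    · simp [pvLoopA, h]
    · simp [pvLoopA, h, ih]

-- the accumulator B maintains, as a function of the best match so far
def pvState : Option (String × String) → Int × Option String
  | none => (-1, none)
  | some b => (PySem.Str.len b.1, some b.2)

-- first match of a length-descending list after a stable insert of a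
theorem pvFind_insertBy (t : String) (a : String × String) (sl : List (String × String))
    (hs : sl.Pairwise (fun x y => y.1.length ≤ x.1.length)) :
    (PySem.List.insertBy
        (fun x y => decide ((-(PySem.Str.len x.1) : Int) < -(PySem.Str.len y.1))) a sl).find?
        (fun kv => PySem.Str.isIn kv.1 t)
      = match sl.find? (fun kv => PySem.Str.isIn kv.1 t) with
        | some b =>
            if PySem.Str.isIn a.1 t && decide (PySem.Str.len b.1 < PySem.Str.len a.1)
            then some a else some b
        | none => if PySem.Str.isIn a.1 t then some a else none := by
  induction sl with
  | nil =>
    by_cases h : PySem.Chars.isIn a.1.toList t.toList = true <;>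
      simp [PySem.List.insertBy, h]
  | cons y ys ih =>
    obtain ⟨hy, hs'⟩ := List.pairwise_cons.mp hs
    by_cases hcmp : y.1.length < a.1.length
    · -- len y < len a : a is inserted in front of y
      have hd : (decide ((-(PySem.Str.len a.1) : Int) < -(PySem.Str.len y.1))) = true := by
        simp; omega
      simp only [PySem.List.insertBy, hd, if_true]
      by_cases hpa : PySem.Str.isIn a.1 t = true
      · rw [List.find?_cons_of_pos (by simpa using hpa)]
        cases hf : (y :: ys).find? (fun kv => PySem.Str.isIn kv.1 t) with
        | none => exact (if_pos hpa).symm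
        | some b =>
          have hble : b.1.length ≤ y.1.length := by
            rcases List.mem_cons.mp (List.mem_of_find?_eq_some hf) with h | h
            · exact h ▸ le_refl _
            · exact hy b h
          have hc : (PySem.Str.isIn a.1 t
              && decide (PySem.Str.len b.1 < PySem.Str.len a.1)) = true := by
            rw [Bool.and_eq_true]
            refine ⟨hpa, ?_⟩
            simp; omega
          exact (if_pos hc).symm
      · rw [List.find?_cons_of_neg (by simpa using hpa)]
        have hpa' : PySem.Str.isIn a.1 t = false := by
          simpa using hpa
        cases hf : (y :: ys).find? (fun kv => PySem.Str.isIn kv.1 t) with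
        | none => exact (if_neg hpa).symm
        | some b =>
          have hpc : PySem.Chars.isIn a.1.toList t.toList = false := by
            simpa using hpa
          have hnc : ¬ ((PySem.Str.isIn a.1 t
              && decide (PySem.Str.len b.1 < PySem.Str.len a.1)) = true) := by
            simp [hpc]
          exact (if_neg hnc).symm
    · -- len a ≤ len y : keep y, insert into the tail
      have hd : (decide ((-(PySem.Str.len a.1) : Int) < -(PySem.Str.len y.1))) = false := by
        simp; omega
      simp only [PySem.List.insertBy, hd, Bool.false_eq_true, if_false]
      by_cases hpy : PySem.Str.isIn y.1 t = true
      · rw [List.find?_cons_of_pos (by simpa using hpy),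
          List.find?_cons_of_pos (by simpa using hpy)]
        have hny : ¬ ((PySem.Str.isIn a.1 t
            && decide (PySem.Str.len y.1 < PySem.Str.len a.1)) = true) := by
          simp; intro _; omega
        exact (if_neg hny).symm
      · rw [List.find?_cons_of_neg (by simpa using hpy),
          List.find?_cons_of_neg (by simpa using hpy), ih hs']

-- B's fold over any prefix of the dict equals the state of A's best match on that prefix
theorem pvMain (t : String) (l : List (String × String)) :
    l.foldl
      (fun (acc : Int × Option String) kv =>
        if PySem.Str.isIn kv.1 t && decide (acc.1 < PySem.Str.len kv.1)
        then (PySem.Str.len kv.1, some kv.2) else acc)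
      (-1, none)
    = pvState ((PySem.List.sorted l (fun x => -(PySem.Str.len x.1))).find?
        (fun kv => PySem.Str.isIn kv.1 t)) := by
  induction l using List.reverseRecOn with
  | nil => rfl
  | append_singleton l a ih =>
    have hsorted : PySem.List.sorted (l ++ [a]) (fun x => -(PySem.Str.len x.1))
        = PySem.List.insertBy
            (fun x y => decide ((-(PySem.Str.len x.1) : Int) < -(PySem.Str.len y.1))) a
            (PySem.List.sorted l (fun x => -(PySem.Str.len x.1))) := by
      rw [PySem.List.sorted_eq_foldl_insertBy, List.foldl_append,
        ← PySem.List.sorted_eq_foldl_insertBy]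
      rfl
    have hp : (PySem.List.sorted l (fun x => -(PySem.Str.len x.1))).Pairwise
        (fun x y => y.1.length ≤ x.1.length) := by
      have h := PySem.List.sorted_pairwise (xs := l) (key := fun x => -(PySem.Str.len x.1))
      refine h.imp ?_
      intro x y hxy
      simp only [PySem.Str.len_eq, String.length_toList] at hxy
      omega
    rw [List.foldl_append, ih, hsorted, pvFind_insertBy t a _ hp]
    cases hf : (PySem.List.sorted l (fun x => -(PySem.Str.len x.1))).find?
        (fun kv => PySem.Str.isIn kv.1 t) with
    | none =>
      simp only [pvState, List.foldl_cons, List.foldl_nil]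
      split_ifs with h1 h2 h2
      · rfl
      · simp only [Bool.and_eq_true] at h1
        exact absurd h1.1 h2
      · exfalso
        simp only [Bool.and_eq_true, decide_eq_true_eq] at h1
        refine h1 ⟨h2, ?_⟩
        rw [PySem.Str.len_eq]
        omega
      · rfl
    | some b =>
      simp only [pvState, List.foldl_cons, List.foldl_nil]
      split_ifs with h1 <;> rfl

-- ===== VERDICT (by name: the statement is the Claim_ definition above) =====
theorem detect_metric_py_spec : Claim_equal_detect_metric_py := by
  intro t _
  unfold Spec_detect_metric_py
  simp only [detect_metric_py, detect_metric_py_alt]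
  rw [pvLoopA_eq_find, pvMain]
  cases hf : (PySem.List.sorted pvAliases (fun x => -(PySem.Str.len x.1))).find?
      (fun kv => PySem.Str.isIn kv.1 t) with
  | none => simp [pvState]
  | some b => simp [pvState]
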